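-- pv_equiv track=rewrite | github.com/Noce99/Nut_SQPnP | src/plot_camera_positions.py | get_data_at_time_t
-- ===== SOURCE A (Python) =====
-- def get_data_at_time_t(xs, ys, zs, t):
--     new_xs = []
--     new_ys = []
--     new_zs = []
--     for i in range(len(xs)):
--         if i <= t:
--             new_xs.append(-xs[i])
--             new_ys.append(ys[i]*2)
--             new_zs.append(-zs[i])
--         else:
--             new_xs.append(-100000)
--             new_ys.append(-100000)
--             new_zs.append(-100000)
--     return new_xs, new_ys, new_zs
-- ===== SOURCE B (Python) =====
-- def get_data_at_time_t(xs, ys, zs, t):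
--     new_xs, new_ys, new_zs = [], [], []
--     i = len(xs) - 1
--     # phase 1: walk backwards over the constant suffix (indices not <= t)
--     while i >= 0 and not (i <= t):
--         new_xs.append(-100000)
--         new_ys.append(-100000)
--         new_zs.append(-100000)
--         i -= 1
--     # phase 2: every remaining index satisfies i <= t (monotone), no test needed
--     while i >= 0:
--         new_xs.append(-xs[i])
--         new_ys.append(ys[i] * 2)
--         new_zs.append(-zs[i])
--         i -= 1
--     new_xs.reverse()
--     new_ys.reverse()
--     new_zs.reverse()
--     return new_xs, new_ys, new_zs
-- ===== Notes on version B (the rewrite author's own statement) =====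
-- stated objective: alternative
-- what changed: B builds the output back-to-front: it walks down from the last index appending the constant -100000 suffix until i<=t first holds, then (exploiting that i<=t is monotone in i) transforms the remaining prefix with no per-element test, and finally reverses the three lists, instead of A's single forward pass that branches on i<=t at every index.
import Mathlib
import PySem

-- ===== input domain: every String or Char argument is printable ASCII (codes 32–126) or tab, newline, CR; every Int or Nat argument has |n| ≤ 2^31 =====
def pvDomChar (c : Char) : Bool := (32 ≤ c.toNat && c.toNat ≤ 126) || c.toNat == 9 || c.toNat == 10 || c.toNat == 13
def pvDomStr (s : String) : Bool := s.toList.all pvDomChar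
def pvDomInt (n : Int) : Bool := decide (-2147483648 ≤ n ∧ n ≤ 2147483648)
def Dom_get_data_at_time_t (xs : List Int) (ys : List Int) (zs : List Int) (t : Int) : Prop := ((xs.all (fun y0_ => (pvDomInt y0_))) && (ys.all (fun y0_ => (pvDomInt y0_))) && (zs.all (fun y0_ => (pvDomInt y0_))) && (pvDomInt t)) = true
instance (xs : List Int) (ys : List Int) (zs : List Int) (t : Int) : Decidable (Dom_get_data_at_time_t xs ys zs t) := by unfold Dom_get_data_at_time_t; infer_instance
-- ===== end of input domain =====

-- B builds the output back-to-front in two phases (constant suffix first, then the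
-- transformed prefix without a per-element test, then a reverse), exploiting that
-- i<=t is monotone in i; objective: alternative.

-- ===== PORT A =====
-- ys[i]/zs[i] are in range for every index the loop reaches under Pre_ (the getD default is never read)
def get_data_at_time_t (xs : List Int) (ys : List Int) (zs : List Int) (t : Int) : List Int × List Int × List Int :=
  (List.range xs.length).foldl
    (fun acc (i : Nat) =>
      if (i : Int) ≤ t then
        (acc.1 ++ [-(xs.getD i 0)], acc.2.1 ++ [(ys.getD i 0) * 2], acc.2.2 ++ [-(zs.getD i 0)])
      else
        (acc.1 ++ [-100000], acc.2.1 ++ [-100000], acc.2.2 ++ [-100000]))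
    ([], [], [])

-- ===== PORT B =====
-- B's first while loop: i runs down from k-1 while ¬(i ≤ t), appending -100000 triples;
-- returns the accumulator together with the number of remaining indices.
def altPhase1 (t : Int) : Nat → List Int × List Int × List Int → (List Int × List Int × List Int) × Nat
  | 0, acc => (acc, 0)
  | k+1, (a, b, c) =>
      if ¬((k : Int) ≤ t) then
        altPhase1 t k (a ++ [-100000], b ++ [-100000], c ++ [-100000])
      else
        ((a, b, c), k+1)

-- B's second while loop: the remaining k indices are transformed with no test.
def altPhase2 (xs ys zs : List Int) : Nat → List Int × List Int × List Int → List Int × List Int × List Int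
  | 0, acc => acc
  | k+1, (a, b, c) =>
      altPhase2 xs ys zs k (a ++ [-(xs.getD k 0)], b ++ [(ys.getD k 0) * 2], c ++ [-(zs.getD k 0)])

def get_data_at_time_t_alt (xs : List Int) (ys : List Int) (zs : List Int) (t : Int) : List Int × List Int × List Int :=
  let r1 := altPhase1 t xs.length ([], [], [])
  let r2 := altPhase2 xs ys zs r1.2 r1.1
  (r2.1.reverse, r2.2.1.reverse, r2.2.2.reverse)

-- ===== PRECONDITION & SPEC =====
-- A (and B) raise IndexError iff ys or zs is shorter than the number of indices i with i ≤ t;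
-- Pre_ admits exactly the inputs on which the Python A returns normally.
def Pre_get_data_at_time_t (xs : List Int) (ys : List Int) (zs : List Int) (t : Int) : Prop :=
  (max 0 (min (xs.length : Int) (t + 1))).toNat ≤ ys.length ∧
  (max 0 (min (xs.length : Int) (t + 1))).toNat ≤ zs.length
instance (xs : List Int) (ys : List Int) (zs : List Int) (t : Int) : Decidable (Pre_get_data_at_time_t xs ys zs t) := by unfold Pre_get_data_at_time_t; infer_instance
def pvWitness_get_data_at_time_t : List Int × List Int × List Int × Int := ([1, 2, 3], [4, 5], [6, 7], 1)

def Spec_get_data_at_time_t (xs : List Int) (ys : List Int) (zs : List Int) (t : Int) (out : List Int × List Int × List Int) : Prop := out = get_data_at_time_t_alt xs ys zs t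
instance (xs : List Int) (ys : List Int) (zs : List Int) (t : Int) (out : List Int × List Int × List Int) : Decidable (Spec_get_data_at_time_t xs ys zs t out) := by unfold Spec_get_data_at_time_t; infer_instance

-- ===== CLAIM (what is proved, stated in full; the proofs are below) =====
def Claim_equal_get_data_at_time_t : Prop := ∀ (xs : List Int) (ys : List Int) (zs : List Int) (t : Int), Dom_get_data_at_time_t xs ys zs t → Pre_get_data_at_time_t xs ys zs t → Spec_get_data_at_time_t xs ys zs t (get_data_at_time_t xs ys zs t)

-- ===== LEMMAS AND PROOFS =====

-- A's loop, with per-component functions and a generalized accumulator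
theorem loopA (t : Int) (fx fy fz : Nat → Int) (l : List Nat) (a b c : List Int) :
    l.foldl
      (fun acc (i : Nat) =>
        if (i : Int) ≤ t then
          (acc.1 ++ [fx i], acc.2.1 ++ [fy i], acc.2.2 ++ [fz i])
        else
          (acc.1 ++ [-100000], acc.2.1 ++ [-100000], acc.2.2 ++ [-100000]))
      (a, b, c)
    = (a ++ l.map (fun (i : Nat) => if (i : Int) ≤ t then fx i else -100000),
       b ++ l.map (fun (i : Nat) => if (i : Int) ≤ t then fy i else -100000),
       c ++ l.map (fun (i : Nat) => if (i : Int) ≤ t then fz i else -100000)) := by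
  induction l generalizing a b c with
  | nil => simp
  | cons hd tl ih =>
    by_cases h : (hd : Int) ≤ t <;> simp [h, ih]

-- a guarded map over range n splits at the cutoff into a mapped prefix and a constant pad
theorem mapSplit (t : Int) (n c : Nat) (g : Nat → Int)
    (hcn : c ≤ n)
    (hlt : ∀ i, i < c → (i : Int) ≤ t)
    (hge : ∀ i, c ≤ i → i < n → ¬ (i : Int) ≤ t) :
    (List.range n).map (fun (i : Nat) => if (i : Int) ≤ t then g i else -100000)
      = (List.range c).map g ++ List.replicate (n - c) (-100000 : Int) := by
  have hn : n = c + (n - c) := by omega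
  rw [hn, List.range_add, List.map_append, List.map_map]
  congr 1
  · exact List.map_congr_left (fun i hi => by
      rw [List.mem_range] at hi
      simp [hlt i hi])
  · have : ((List.range (n - c)).map (fun j => if ((c + j : Nat) : Int) ≤ t then g (c + j) else -100000))
        = (List.range (n - c)).map (fun _ => (-100000 : Int)) := by
      refine List.map_congr_left (fun j hj => ?_)
      rw [List.mem_range] at hj
      have h2 := hge (c + j) (by omega) (by omega)
      push_cast at h2
      simp [h2]
    simpa [List.map_const'] using this

-- phase 1 appends d sentinels and stops with exactly c indices remaining
theorem phase1_eq (t : Int) (c : Nat) (hc : c = 0 ∨ (c : Int) - 1 ≤ t) :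
    ∀ (d : Nat) (a b cl : List Int),
      (∀ i, c ≤ i → i < c + d → ¬ ((i : Int) ≤ t)) →
      altPhase1 t (c + d) (a, b, cl)
        = ((a ++ List.replicate d (-100000 : Int),
            b ++ List.replicate d (-100000 : Int),
            cl ++ List.replicate d (-100000 : Int)), c) := by
  intro d
  induction d with
  | zero =>
    intro a b cl _
    cases hc with
    | inl h0 => subst h0; simp [altPhase1]
    | inr hle =>
      match c, hle with
      | 0, _ => simp [altPhase1]
      | m+1, hle =>
        have hm : ((m : Nat) : Int) ≤ t := by push_cast at hle ⊢; omega
        simp [altPhase1, hm]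
  | succ d ih =>
    intro a b cl hge
    have hsum : c + (d + 1) = (c + d) + 1 := by omega
    rw [hsum]
    have hnot : ¬ (((c + d : Nat) : Int) ≤ t) := by
      have := hge (c + d) (by omega) (by omega)
      push_cast at this ⊢; omega
    rw [altPhase1, if_pos hnot]
    rw [ih _ _ _ (fun i h1 h2 => hge i h1 (by omega))]
    simp [List.replicate_succ, List.append_assoc]

-- phase 2 appends the transformed indices k-1, …, 0, i.e. the reversed mapped range
theorem phase2_eq (xs ys zs : List Int) :
    ∀ (k : Nat) (a b c : List Int),
      altPhase2 xs ys zs k (a, b, c)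
        = (a ++ (List.range k).reverse.map (fun i => -(xs.getD i 0)),
           b ++ (List.range k).reverse.map (fun i => (ys.getD i 0) * 2),
           c ++ (List.range k).reverse.map (fun i => -(zs.getD i 0))) := by
  intro k
  induction k with
  | zero => intro a b c; simp [altPhase2]
  | succ k ih =>
    intro a b c
    rw [altPhase2, ih]
    simp [List.range_succ, List.append_assoc]

theorem cutoff_le (xs : List Int) (t : Int) :
    (max 0 (min (xs.length : Int) (t + 1))).toNat ≤ xs.length := by omega

theorem cutoff_lt_le (xs : List Int) (t : Int) (i : Nat)
    (h : i < (max 0 (min (xs.length : Int) (t + 1))).toNat) : (i : Int) ≤ t := by omega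

theorem cutoff_ge_gt (xs : List Int) (t : Int) (i : Nat)
    (h1 : (max 0 (min (xs.length : Int) (t + 1))).toNat ≤ i) (h2 : i < xs.length) :
    ¬ (i : Int) ≤ t := by omega

-- B computed in closed form: transformed prefix of length c, then the sentinel pad
theorem alt_closed (xs ys zs : List Int) (t : Int) :
    get_data_at_time_t_alt xs ys zs t
      = ((List.range ((max 0 (min (xs.length : Int) (t + 1))).toNat)).map (fun i => -(xs.getD i 0))
            ++ List.replicate (xs.length - (max 0 (min (xs.length : Int) (t + 1))).toNat) (-100000 : Int),
         (List.range ((max 0 (min (xs.length : Int) (t + 1))).toNat)).map (fun i => (ys.getD i 0) * 2)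
            ++ List.replicate (xs.length - (max 0 (min (xs.length : Int) (t + 1))).toNat) (-100000 : Int),
         (List.range ((max 0 (min (xs.length : Int) (t + 1))).toNat)).map (fun i => -(zs.getD i 0))
            ++ List.replicate (xs.length - (max 0 (min (xs.length : Int) (t + 1))).toNat) (-100000 : Int)) := by
  set c := (max 0 (min (xs.length : Int) (t + 1))).toNat with hc
  have hcle : c ≤ xs.length := cutoff_le xs t
  have hn : xs.length = c + (xs.length - c) := by omega
  unfold get_data_at_time_t_alt
  rw [hn, phase1_eq t c
        (by rcases Nat.eq_zero_or_pos c with h | h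
            · exact Or.inl h
            · right
              have := cutoff_lt_le xs t (c - 1) (by omega)
              push_cast at this ⊢; omega)
        _ [] [] []
        (fun i h1 h2 => cutoff_ge_gt xs t i h1 (by omega))]
  simp only [List.nil_append]
  rw [phase2_eq]
  simp [List.reverse_append, List.map_reverse]

-- ===== VERDICT (by name: the statement is the Claim_ definition above) =====
theorem get_data_at_time_t_spec : Claim_equal_get_data_at_time_t := by
  intro xs ys zs t _ _
  unfold Spec_get_data_at_time_t get_data_at_time_t
  rw [loopA, alt_closed]
  simp only [List.nil_append]
  refine Prod.ext ?_ (Prod.ext ?_ ?_) <;>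
    exact mapSplit t xs.length _ _ (cutoff_le xs t) (cutoff_lt_le xs t) (cutoff_ge_gt xs t)
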